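-- pv_equiv track=rewrite | github.com/runarmod/everybody-codes | 2024/02/main.py | thing
-- ===== SOURCE A (Python) =====
-- def thing(words, sentences, second=False):
--     indexes: set[tuple[int, int]] = set()
--     for word in words:
--         # Horizontal
--         for y, sentence in enumerate(sentences):
--             for i in range(len(sentence)):
--                 if second:
--                     _sentence = sentence
--                 else:
--                     _sentence = sentence + sentence
--                 if _sentence[i : i + len(word)] == word:
--                     indexes.update((x, y) for x in range(i, i + len(word)))
--                 if _sentence[i : i + len(word)] == word[::-1]:
--                     indexes.update((x, y) for x in range(i, i + len(word)))
--     return indexes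
-- ===== SOURCE B (Python) =====
-- def _occurrences(text, pat, limit):
--     # all start positions < limit where pat occurs in text, ascending
--     res = []
--     pos = text.find(pat)
--     while 0 <= pos < limit:
--         res.append(pos)
--         pos = text.find(pat, pos + 1)
--     return res
--
--
-- def thing(words, sentences, second=False):
--     indexes = set()
--     for word in words:
--         if not word:
--             continue
--         rev = word[::-1]
--         for y, sentence in enumerate(sentences):
--             text = sentence if second else sentence + sentence
--             n = len(sentence)
--             starts = sorted(set(_occurrences(text, word, n) + _occurrences(text, rev, n)))
--             for i in starts:
--                 for x in range(i, i + len(word)):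
--                     indexes.add((x, y))
--     return indexes
-- ===== Notes on version B (the rewrite author's own statement) =====
-- stated objective: alternative
-- what changed: Instead of slicing the (doubled) sentence at every index and comparing against the word and its reversal, B precomputes the reversed word once and collects match start positions with repeated str.find occurrence search, then merges the two sorted occurrence lists and marks the covered index ranges.
import Mathlib
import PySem

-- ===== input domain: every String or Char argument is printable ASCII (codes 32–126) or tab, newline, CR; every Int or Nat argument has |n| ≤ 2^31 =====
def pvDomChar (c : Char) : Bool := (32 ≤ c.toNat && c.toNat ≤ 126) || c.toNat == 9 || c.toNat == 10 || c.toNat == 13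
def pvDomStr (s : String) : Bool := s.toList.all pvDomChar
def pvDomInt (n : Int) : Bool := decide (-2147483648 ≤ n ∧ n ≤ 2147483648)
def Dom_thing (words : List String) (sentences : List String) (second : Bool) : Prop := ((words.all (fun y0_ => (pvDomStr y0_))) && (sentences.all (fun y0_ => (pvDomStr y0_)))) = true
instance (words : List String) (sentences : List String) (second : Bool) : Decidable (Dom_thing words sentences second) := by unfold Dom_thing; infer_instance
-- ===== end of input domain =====

-- B replaces A's per-index slice comparison (against the word and its reversal) by str.find-based
-- occurrence search with a precomputed reversed word, merging the two sorted start lists (objective: alternative occurrence-search algorithm).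

-- ===== PORT A =====
-- word[::-1] is ported as w.reverse (PySem.Chars.slice?_none_none_neg_one / slice?_none_none_neg_one).
def thing (words : List String) (sentences : List String) (second : Bool) : List (Int × Int) :=
  words.foldl (fun indexes word =>
    (PySem.List.enumerate sentences 0).foldl (fun indexes p =>
      (PySem.List.pyRange 0 ((p.2.toList.length : Nat) : Int) 1).foldl (fun indexes i =>
        let s := if second then p.2.toList else p.2.toList ++ p.2.toList
        let w := word.toList
        let indexes :=
          if PySem.List.slice s (some i) (some (i + (w.length : Int))) = w then
            PySem.Set.update indexes ((PySem.List.pyRange i (i + (w.length : Int)) 1).map (fun x => (x, p.1)))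
          else indexes
        if PySem.List.slice s (some i) (some (i + (w.length : Int))) = w.reverse then
          PySem.Set.update indexes ((PySem.List.pyRange i (i + (w.length : Int)) 1).map (fun x => (x, p.1)))
        else indexes) indexes) indexes) []

-- ===== PORT B =====
-- `while 0 <= pos < limit: res.append(pos); pos = text.find(pat, pos+1)` — fuel only makes the
-- recursion total; pv_occLoop_spec proves the fuel used in pvOccurrences suffices.
def pvOccLoop (text pat : List Char) (limit : Int) : Int → Nat → List Int
  | _, 0 => []
  | pos, fuel + 1 =>
    if 0 ≤ pos ∧ pos < limit then
      pos :: pvOccLoop text pat limit (PySem.Chars.findFrom text pat (pos + 1)) fuel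
    else []

def pvOccurrences (text pat : List Char) (limit : Int) : List Int :=
  pvOccLoop text pat limit (PySem.Chars.find text pat) (limit.toNat + 1)

def thing_alt (words : List String) (sentences : List String) (second : Bool) : List (Int × Int) :=
  words.foldl (fun indexes word =>
    let w := word.toList
    if w = [] then indexes
    else
      (PySem.List.enumerate sentences 0).foldl (fun indexes p =>
        let s := p.2.toList
        let text := if second then s else s ++ s
        let starts := PySem.List.sorted
          (PySem.Set.ofList (pvOccurrences text w ((s.length : Nat) : Int) ++
                             pvOccurrences text w.reverse ((s.length : Nat) : Int))) (fun x => x)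
        starts.foldl (fun indexes i =>
          (PySem.List.pyRange i (i + (w.length : Int)) 1).foldl
            (fun indexes x => PySem.Set.add indexes (x, p.1)) indexes) indexes) indexes) []

-- ===== PRECONDITION & SPEC =====
def Spec_thing (words : List String) (sentences : List String) (second : Bool) (out : List (Int × Int)) : Prop := out = thing_alt words sentences second
instance (words : List String) (sentences : List String) (second : Bool) (out : List (Int × Int)) : Decidable (Spec_thing words sentences second out) := by unfold Spec_thing; infer_instance

-- ===== CLAIM (what is proved, stated in full; the proofs are below) =====
def Claim_equal_thing : Prop := ∀ (words : List String) (sentences : List String) (second : Bool), Dom_thing words sentences second → Spec_thing words sentences second (thing words sentences second)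

-- ===== LEMMAS AND PROOFS =====

lemma pv_slice_eq_iff (text pat : List Char) (i L : Int) (hi : 0 ≤ i)
    (hL : L = (pat.length : Int)) :
    PySem.List.slice text (some i) (some (i + L)) = pat ↔ pat <+: text.drop i.toNat := by
  subst hL
  rw [PySem.List.slice_toNat text hi (by omega)]
  have h : (i + (pat.length : Int)).toNat - i.toNat = pat.length := by omega
  rw [h, List.prefix_iff_eq_take]
  exact eq_comm

lemma pv_update_of_subset {α : Type} [BEq α] [LawfulBEq α] (s : PySem.Set α) (l : List α)
    (h : ∀ x ∈ l, x ∈ s) : PySem.Set.update s l = s := by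
  induction l generalizing s with
  | nil => rfl
  | cons x xs ih =>
    show PySem.Set.update (PySem.Set.add s x) xs = s
    rw [PySem.Set.add_of_mem (h x (by simp))]
    exact ih s (fun y hy => h y (by simp [hy]))

lemma pv_update_update {α : Type} [BEq α] [LawfulBEq α] (s : PySem.Set α) (l : List α) :
    PySem.Set.update (PySem.Set.update s l) l = PySem.Set.update s l :=
  pv_update_of_subset _ _ (fun x hx => (PySem.Set.mem_update s l x).2 (Or.inr hx))

lemma pv_foldl_ite_filter {α β : Type} (p : β → Bool) (f : α → β → α) (l : List β) (acc : α) :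
    l.foldl (fun a b => if p b then f a b else a) acc = (l.filter p).foldl f acc := by
  induction l generalizing acc with
  | nil => rfl
  | cons x xs ih => by_cases h : p x <;> simp [h, ih]

lemma pv_occLoop_spec (text pat : List Char) (n : Int) (hn : n ≤ (text.length : Int)) :
    ∀ (fuel : Nat) (a : Nat), (a : Int) ≤ (text.length : Int) → (n - (a : Int)).toNat < fuel →
      pvOccLoop text pat n (PySem.Chars.findFrom text pat (a : Int)) fuel
        = (PySem.List.pyRange (a : Int) n 1).filter (fun i => decide (pat <+: text.drop i.toNat)) := by
  intro fuel
  induction fuel with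
  | zero => intro a _ hf; omega
  | succ fuel ih =>
    intro a ha hf
    have hale : a ≤ text.length := by exact_mod_cast ha
    by_cases hneg : PySem.Chars.findFrom text pat (a : Int) = -1
    · have hno : ¬ pat <:+: text.drop a :=
        (PySem.Chars.findFrom_natCast_eq_neg_one_iff text pat a hale).1 hneg
      rw [hneg]
      have hfil : (PySem.List.pyRange (a : Int) n 1).filter
          (fun i => decide (pat <+: text.drop i.toNat)) = [] := by
        rw [List.filter_eq_nil_iff]
        intro i hi
        have hmem := PySem.List.mem_pyRange_one.1 hi
        simp only [decide_eq_true_eq]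
        intro hpre
        apply hno
        have hdd : text.drop i.toNat = List.drop (i.toNat - a) (text.drop a) := by
          rw [List.drop_drop]; congr 1; omega
        exact (hdd ▸ hpre).isInfix.trans (List.drop_suffix _ _).isInfix
      rw [hfil]
      simp [pvOccLoop]
    · obtain ⟨hja, hpre, hmin⟩ := PySem.Chars.findFrom_natCast_spec text pat a hale hneg
      set j := PySem.Chars.findFrom text pat (a : Int) with hj
      have hj0 : 0 ≤ j := le_trans (by exact_mod_cast Nat.zero_le a) hja
      by_cases hjn : j < n
      · have hstep : pvOccLoop text pat n j (fuel + 1)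
            = j :: pvOccLoop text pat n (PySem.Chars.findFrom text pat (j + 1)) fuel := by
          simp [pvOccLoop, hj0, hjn]
        rw [hstep]
        have hjcast : j = ((j.toNat : Nat) : Int) := by omega
        have htail : pvOccLoop text pat n (PySem.Chars.findFrom text pat (j + 1)) fuel
            = (PySem.List.pyRange (j + 1) n 1).filter (fun i => decide (pat <+: text.drop i.toNat)) := by
          have h1 : ((j.toNat + 1 : Nat) : Int) ≤ (text.length : Int) := by
            push_cast; omega
          have h2 : (n - ((j.toNat + 1 : Nat) : Int)).toNat < fuel := by
            push_cast; omega
          have := ih (j.toNat + 1) h1 h2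
          have hc : ((j.toNat + 1 : Nat) : Int) = j + 1 := by push_cast; omega
          rwa [hc] at this
        rw [htail]
        have hsplit : PySem.List.pyRange (a : Int) n 1
            = PySem.List.pyRange (a : Int) j 1 ++ (j :: PySem.List.pyRange (j + 1) n 1) := by
          rw [PySem.List.pyRange_one_append (a : Int) j n hja (le_of_lt hjn),
              PySem.List.pyRange_one_cons hjn]
        rw [hsplit, List.filter_append, List.filter_cons]
        have hfila : (PySem.List.pyRange (a : Int) j 1).filter
            (fun i => decide (pat <+: text.drop i.toNat)) = [] := by
          rw [List.filter_eq_nil_iff]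
          intro i hi
          have hmem := PySem.List.mem_pyRange_one.1 hi
          simp only [decide_eq_true_eq]
          exact hmin i.toNat (by omega) (by omega)
        rw [hfila]
        simp [hpre]
      · have hstop : pvOccLoop text pat n j (fuel + 1) = [] := by
          simp [pvOccLoop, hjn]
        rw [hstop]
        rw [eq_comm, List.filter_eq_nil_iff]
        intro i hi
        have hmem := PySem.List.mem_pyRange_one.1 hi
        simp only [decide_eq_true_eq]
        exact hmin i.toNat (by omega) (by omega)

lemma pv_occurrences_spec (text pat : List Char) (n : Int) (h0 : 0 ≤ n)
    (hn : n ≤ (text.length : Int)) :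
    pvOccurrences text pat n
      = (PySem.List.pyRange 0 n 1).filter (fun i => decide (pat <+: text.drop i.toNat)) := by
  unfold pvOccurrences
  rw [← PySem.Chars.findFrom_zero]
  have h := pv_occLoop_spec text pat n hn (n.toNat + 1) 0 (by exact_mod_cast Nat.zero_le _) (by omega)
  simpa using h

lemma pv_starts_eq (w s text : List Char) (hlen : (s.length : Int) ≤ (text.length : Int)) :
    PySem.List.sorted
        (PySem.Set.ofList (pvOccurrences text w ((s.length : Nat) : Int) ++
                           pvOccurrences text w.reverse ((s.length : Nat) : Int))) (fun x => x)
      = (PySem.List.pyRange 0 ((s.length : Nat) : Int) 1).filter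
          (fun i => decide (w <+: text.drop i.toNat) || decide (w.reverse <+: text.drop i.toNat)) := by
  apply PySem.List.sorted_eq_of_perm_of_pairwise_lt
  · rw [List.perm_ext_iff_of_nodup
      ((PySem.List.nodup_pyRange_one _ _).filter _) (PySem.Set.nodup_ofList _)]
    intro x
    rw [PySem.Set.mem_ofList, List.mem_append,
        pv_occurrences_spec text w _ (by exact_mod_cast Nat.zero_le _) hlen,
        pv_occurrences_spec text w.reverse _ (by exact_mod_cast Nat.zero_le _) hlen]
    simp only [List.mem_filter, Bool.or_eq_true]
    tauto
  · exact (PySem.List.pairwise_lt_pyRange_one _ _).filter _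


lemma pv_main (words sentences : List String) (second : Bool) :
    thing words sentences second = thing_alt words sentences second := by
  unfold thing thing_alt
  apply PySem.List.foldl_congr_mem
  intro acc word _
  by_cases hw : word.toList = []
  · dsimp only
    rw [if_pos hw]
    refine (PySem.List.foldl_congr_mem _ _ (fun a _ => a) acc ?_).trans (List.foldl_fixed _)
    intro a p _
    refine (PySem.List.foldl_congr_mem _ _ (fun a _ => a) a ?_).trans (List.foldl_fixed _)
    intro b i _
    simp [hw, PySem.List.pyRange_one_eq_nil (le_refl i), PySem.Set.update]
  · dsimp only
    rw [if_neg hw]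
    apply PySem.List.foldl_congr_mem
    intro acc2 p _
    dsimp only
    have hlen : ((p.2.toList.length : Nat) : Int)
        ≤ (((if second then p.2.toList else p.2.toList ++ p.2.toList) : List Char).length : Int) := by
      by_cases h2 : second <;> simp [h2]
    rw [pv_starts_eq word.toList p.2.toList _ hlen]
    rw [PySem.List.foldl_congr_mem _ _
      (fun a i => if (decide (word.toList <+: (if second then p.2.toList else p.2.toList ++ p.2.toList).drop i.toNat) ||
                      decide (word.toList.reverse <+: (if second then p.2.toList else p.2.toList ++ p.2.toList).drop i.toNat)) then
          PySem.Set.update a ((PySem.List.pyRange i (i + (word.toList.length : Int)) 1).map (fun x => (x, p.1)))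
        else a) acc2 ?_]
    · rw [pv_foldl_ite_filter]
      apply PySem.List.foldl_congr_mem
      intro a i _
      simp [PySem.Set.update, List.foldl_map]
    · intro a i hi
      have hi0 : 0 ≤ i := (PySem.List.mem_pyRange_one.1 hi).1
      by_cases h1 : word.toList <+: ((if second then p.2.toList else p.2.toList ++ p.2.toList).drop i.toNat) <;>
      by_cases h2 : word.toList.reverse <+: ((if second then p.2.toList else p.2.toList ++ p.2.toList).drop i.toNat) <;>
      simp [pv_slice_eq_iff _ word.toList i ((word.length : Nat) : Int) hi0 (by simp),
            pv_slice_eq_iff _ word.toList.reverse i ((word.length : Nat) : Int) hi0 (by simp),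
            h1, h2, pv_update_update]

-- ===== VERDICT (by name: the statement is the Claim_ definition above) =====
theorem thing_spec : Claim_equal_thing := by
  intro words sentences second _
  exact pv_main words sentences second
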